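-- pv_equiv track=rewrite | github.com/Slashee-the-Cow/SlasheesCuraPosts | DeleteAddedTemperature/DeleteAddedTemperature.py | execute
-- ===== SOURCE A (Python) =====
-- def execute(data):
--     new_layer = []
--     delete_mode = False
--
--     startup_layer = data[1].split("\n")
--     for line in startup_layer:
--         if not delete_mode:
--             if line.startswith(";Generated with"):
--                 delete_mode = True
--             new_layer.append(line)
--         else:
--             match line.split()[0]:
--                 case "M104" | "M105" | "M109" | "M140" | "M141" | "M190" | "M191":
--                     continue
--                 case _:
--                     delete_mode = False
--                     new_layer.append(line)
--
--     layer_1 = "\n".join(new_layer)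
--     data[1] = layer_1
--     return data
-- ===== SOURCE B (Python) =====
-- TEMP_COMMANDS = ("M104", "M105", "M109", "M140", "M141", "M190", "M191")
--
-- def _find_marker(lines):
--     for k, line in enumerate(lines):
--         if line.startswith(";Generated with"):
--             return k
--     return None
--
-- def _count_temps(lines):
--     j = 0
--     while j < len(lines) and lines[j].split()[0] in TEMP_COMMANDS:
--         j += 1
--     return j
--
-- def execute(data):
--     out = []
--     rest = data[1].split("\n")
--     while rest:
--         k = _find_marker(rest)
--         if k is None:
--             out += rest
--             break
--         tail = rest[k + 1:]
--         j = _count_temps(tail)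
--         out += rest[:k + 1] + tail[j:j + 1]
--         rest = tail[j + 1:]
--     data[1] = "\n".join(out)
--     return data
-- ===== Notes on version B (the rewrite author's own statement) =====
-- stated objective: alternative
-- what changed: Replaced A's per-line scan carrying a delete_mode flag by a chunk-based algorithm: repeatedly search for the next ';Generated with' marker, copy the whole prefix up to it with a slice, count the leading temperature commands after it, and splice in the first breaking line, iterating on the remaining slice.
import Mathlib
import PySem

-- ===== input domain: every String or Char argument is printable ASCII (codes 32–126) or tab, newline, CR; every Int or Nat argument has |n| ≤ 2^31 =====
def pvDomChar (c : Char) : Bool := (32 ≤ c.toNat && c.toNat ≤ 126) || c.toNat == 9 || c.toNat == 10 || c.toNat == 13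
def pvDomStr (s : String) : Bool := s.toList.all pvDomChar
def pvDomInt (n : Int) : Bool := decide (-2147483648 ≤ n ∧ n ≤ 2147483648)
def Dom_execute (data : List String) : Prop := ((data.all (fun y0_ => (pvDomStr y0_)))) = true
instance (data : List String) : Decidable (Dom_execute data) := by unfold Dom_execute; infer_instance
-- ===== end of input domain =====

-- B replaces A's delete_mode flag pass by a chunk-based algorithm (find next marker, slice-copy
-- the prefix, count leading temperature commands, splice the breaking line) — objective:
-- alternative, same cost. Both A and B mutate data[1] in place in Python (the same mutation);
-- the theorems are about the returned list.


-- shared primitive: s.split("\n") (exact: split? is none only for sep = "", never here)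
def pySplitNL (s : String) : List String := (PySem.Str.split? s "\n").getD []

-- ===== PORT A =====
-- the loop over startup_layer with the delete_mode flag and the new_layer accumulator
def execALoop (acc : List String) (mode : Bool) : List String → List String
  | [] => acc
  | line :: rest =>
    if !mode then
      if PySem.Str.startswith line ";Generated with" then
        execALoop (acc ++ [line]) true rest          -- delete_mode = True; append
      else
        execALoop (acc ++ [line]) mode rest
    else
      -- line.split()[0]; split() = [] is IndexError (excluded by Pre_), headD "" there
      let cmd := (PySem.Str.split₀ line).headD ""
      if cmd == "M104" || cmd == "M105" || cmd == "M109" || cmd == "M140" ||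
         cmd == "M141" || cmd == "M190" || cmd == "M191" then
        execALoop acc mode rest                      -- continue
      else
        execALoop (acc ++ [line]) false rest         -- delete_mode = False; append

def execute (data : List String) : List String :=
  -- data[1]: IndexError when data.length < 2 (excluded by Pre_), "" default there
  let startupLayer := pySplitNL ((PySem.List.pyGet? data 1).getD "")
  let newLayer := execALoop [] false startupLayer
  data.set 1 (PySem.Str.join "\n" newLayer)

-- ===== PORT B =====
def tempCommands : List String := ["M104", "M105", "M109", "M140", "M141", "M190", "M191"]

-- _find_marker: index of the first line starting with ';Generated with', if any
def findMarker : List String → Option Nat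
  | [] => none
  | l :: ls =>
    if PySem.Str.startswith l ";Generated with" then some 0
    else (findMarker ls).map (· + 1)

-- _count_temps: how many leading lines have their first token in TEMP_COMMANDS
-- (lines[j].split()[0]; split() = [] is IndexError (excluded by Pre_), headD "" there)
def countTemps : List String → Nat
  | [] => 0
  | l :: ls =>
    if tempCommands.contains ((PySem.Str.split₀ l).headD "") then countTemps ls + 1 else 0

-- the 'while rest:' loop: find the next marker, splice slices, recurse on the remainder
def execBLoop : List String → List String
  | [] => []
  | l :: ls =>
    match findMarker (l :: ls) with
    | none => l :: ls
    | some k =>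
      let tail := (l :: ls).drop (k + 1)
      let j := countTemps tail
      (l :: ls).take (k + 1) ++ (tail.drop j).take 1 ++ execBLoop (tail.drop (j + 1))
termination_by rest => rest.length
decreasing_by
  simp only [List.length_drop, List.length_cons]
  omega

def execute_alt (data : List String) : List String :=
  let rest := pySplitNL ((PySem.List.pyGet? data 1).getD "")
  data.set 1 (PySem.Str.join "\n" (execBLoop rest))

-- ===== PRECONDITION & SPEC =====
-- Pre_ excludes the inputs on which Python A raises IndexError: data shorter than 2, and a
-- whitespace-only line while delete mode is active (line.split()[0] on an empty split). The
-- second condition is over-approximated in closed form — no whitespace-only line anywhere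
-- after a ';Generated with' line — so it also excludes some inputs on which A returns
-- (a blank line after a delete block has already ended); B returns the same value there.
def Pre_execute (data : List String) : Prop :=
  2 ≤ data.length ∧
  ∀ i j : Fin (pySplitNL ((PySem.List.pyGet? data 1).getD "")).length, i < j →
    PySem.Str.startswith ((pySplitNL ((PySem.List.pyGet? data 1).getD ""))[i]) ";Generated with" = true →
    PySem.Str.split₀ ((pySplitNL ((PySem.List.pyGet? data 1).getD ""))[j]) ≠ []
instance (data : List String) : Decidable (Pre_execute data) := by unfold Pre_execute; infer_instance

def pvWitness_execute : List String :=
  ["M140 S60\nM104 S200", ";Generated with Cura\nM104 S200\nM105\nG1 X1\nM109 S210\nhello"]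

def Spec_execute (data : List String) (out : List String) : Prop := out = execute_alt data
instance (data : List String) (out : List String) : Decidable (Spec_execute data out) := by unfold Spec_execute; infer_instance

-- ===== CLAIM (what is proved, stated in full; the proofs are below) =====
def Claim_equal_execute : Prop := ∀ (data : List String), Dom_execute data → Pre_execute data → Spec_execute data (execute data)

-- ===== LEMMAS AND PROOFS =====

-- A's temp-command test equals B's membership test
theorem temp_test_eq (cmd : String) :
    (cmd == "M104" || cmd == "M105" || cmd == "M109" || cmd == "M140" ||
     cmd == "M141" || cmd == "M190" || cmd == "M191") = tempCommands.contains cmd := by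
  by_cases h1 : cmd = "M104" <;> by_cases h2 : cmd = "M105" <;>
  by_cases h3 : cmd = "M109" <;> by_cases h4 : cmd = "M140" <;>
  by_cases h5 : cmd = "M141" <;> by_cases h6 : cmd = "M190" <;>
  by_cases h7 : cmd = "M191" <;>
  simp_all [tempCommands, List.contains_eq_mem]

-- one step of A's loop in normal mode
theorem aloop_false_cons (acc : List String) (l : String) (rest : List String) :
    execALoop acc false (l :: rest) =
      if PySem.Str.startswith l ";Generated with" then execALoop (acc ++ [l]) true rest
      else execALoop (acc ++ [l]) false rest := by
  simp only [execALoop, Bool.not_false, if_true]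

-- one step of A's loop in delete mode, phrased with B's membership test
theorem aloop_true_cons (acc : List String) (l : String) (rest : List String) :
    execALoop acc true (l :: rest) =
      if tempCommands.contains ((PySem.Str.split₀ l).headD "") then execALoop acc true rest
      else execALoop (acc ++ [l]) false rest := by
  simp only [execALoop, Bool.not_true, Bool.false_eq_true, if_false, temp_test_eq]

-- no marker anywhere: A's flag stays false and every line is appended
theorem aloop_no_marker (ls : List String) : ∀ acc, findMarker ls = none →
    execALoop acc false ls = acc ++ ls := by
  induction ls with
  | nil => intro acc _; simp [execALoop]
  | cons l rest ih =>
    intro acc h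
    cases hs : PySem.Str.startswith l ";Generated with" with
    | true => rw [findMarker, if_pos hs] at h; exact absurd h (by simp)
    | false =>
      rw [findMarker, if_neg (by simp only [hs, Bool.false_eq_true, not_false_eq_true])] at h
      rw [aloop_false_cons, if_neg (by simp only [hs, Bool.false_eq_true, not_false_eq_true]), ih _ (by simpa using h)]
      simp

-- up to and including the first marker, A appends everything and flips the flag
theorem aloop_to_marker (ls : List String) : ∀ k acc, findMarker ls = some k →
    execALoop acc false ls = execALoop (acc ++ ls.take (k + 1)) true (ls.drop (k + 1)) := by
  induction ls with
  | nil => intro k acc h; simp [findMarker] at h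
  | cons l rest ih =>
    intro k acc h
    cases hs : PySem.Str.startswith l ";Generated with" with
    | true =>
      rw [findMarker, if_pos hs] at h
      have hk : k = 0 := by simpa using h.symm
      subst hk
      rw [aloop_false_cons, if_pos hs]
      simp
    | false =>
      rw [findMarker, if_neg (by simp only [hs, Bool.false_eq_true, not_false_eq_true]), Option.map_eq_some_iff] at h
      obtain ⟨k', hk', rfl⟩ := h
      rw [aloop_false_cons, if_neg (by simp only [hs, Bool.false_eq_true, not_false_eq_true]), ih k' (acc ++ [l]) hk']
      simp [List.take_succ_cons, List.drop_succ_cons]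

-- in delete mode, A skips exactly countTemps lines, then appends the breaking line
theorem aloop_true (tail : List String) : ∀ acc,
    execALoop acc true tail =
      execALoop (acc ++ (tail.drop (countTemps tail)).take 1) false
        (tail.drop (countTemps tail + 1)) := by
  induction tail with
  | nil => intro acc; simp [execALoop]
  | cons l rest ih =>
    intro acc
    cases ht : tempCommands.contains ((PySem.Str.split₀ l).headD "") with
    | true =>
      have hc : countTemps (l :: rest) = countTemps rest + 1 := by
        rw [countTemps, if_pos ht]
      rw [aloop_true_cons, if_pos ht, hc, List.drop_succ_cons, List.drop_succ_cons]
      exact ih acc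
    | false =>
      have hc : countTemps (l :: rest) = 0 := by
        rw [countTemps, if_neg (by simp only [ht, Bool.false_eq_true, not_false_eq_true])]
      rw [aloop_true_cons, if_neg (by simp only [ht, Bool.false_eq_true, not_false_eq_true]), hc]
      simp

-- one-step unfoldings of B's loop
theorem bloop_nil : execBLoop [] = [] := by rw [execBLoop]

theorem bloop_cons_none (l : String) (ls : List String) (h : findMarker (l :: ls) = none) :
    execBLoop (l :: ls) = l :: ls := by
  rw [execBLoop, h]

theorem bloop_cons_some (l : String) (ls : List String) (k : Nat)
    (h : findMarker (l :: ls) = some k) :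
    execBLoop (l :: ls) =
      (l :: ls).take (k + 1) ++
        (((l :: ls).drop (k + 1)).drop (countTemps ((l :: ls).drop (k + 1)))).take 1 ++
        execBLoop (((l :: ls).drop (k + 1)).drop (countTemps ((l :: ls).drop (k + 1)) + 1)) := by
  rw [execBLoop, h]

-- the two loops compute the same list
theorem aloop_eq_bloop : ∀ n ls acc, ls.length ≤ n →
    execALoop acc false ls = acc ++ execBLoop ls := by
  intro n
  induction n with
  | zero =>
    intro ls acc h
    have : ls = [] := List.eq_nil_of_length_eq_zero (by omega)
    subst this; simp [execALoop, bloop_nil]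
  | succ n ih =>
    intro ls acc h
    match ls with
    | [] => simp [execALoop, bloop_nil]
    | r :: rs =>
      cases hm : findMarker (r :: rs) with
      | none => rw [aloop_no_marker _ _ hm, bloop_cons_none _ _ hm]
      | some k =>
        rw [aloop_to_marker _ k _ hm, aloop_true,
          ih _ _ (by simp only [List.length_drop, List.length_cons] at *; omega),
          bloop_cons_some _ _ _ hm]
        simp

-- ===== VERDICT (by name: the statement is the Claim_ definition above) =====
theorem execute_spec : Claim_equal_execute := by
  intro data _ _
  show execute data = execute_alt data
  simp only [execute, execute_alt]
  rw [aloop_eq_bloop (pySplitNL ((PySem.List.pyGet? data 1).getD "")).length _ [] le_rfl]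
  simp
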